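-- pv_equiv track=rewrite | github.com/reco92/pychallenges | daily1.py | song_decoder
-- ===== SOURCE A (Python) =====
-- def song_decoder(song):
--     song = song.replace('WUB', ' ')
--     song = song.strip()
--     lsong = list(song)
--     index = 0
--     if len(song) <= 2:
--         return song
--
--     while index < len(lsong) - 2:
--         if (lsong[index] == ' ' or  lsong[index] == '')  and  lsong[index+1] == ' ':
--              lsong[index+1] = ''
--         index += 1
--
--     return "".join(lsong)
-- ===== SOURCE B (Python) =====
-- def song_decoder(song):
--     # Decompose: replace WUBs, strip, split into words, drop empties, rejoin.
--     s = song.replace('WUB', ' ').strip()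
--     return ' '.join(w for w in s.split(' ') if w)
-- ===== Notes on version B (the rewrite author's own statement) =====
-- stated objective: simpler
-- what changed: B replaces the index-mutating in-place character-collapse while loop by a split-into-words / filter-empties / rejoin pipeline in two lines.
import Mathlib
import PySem

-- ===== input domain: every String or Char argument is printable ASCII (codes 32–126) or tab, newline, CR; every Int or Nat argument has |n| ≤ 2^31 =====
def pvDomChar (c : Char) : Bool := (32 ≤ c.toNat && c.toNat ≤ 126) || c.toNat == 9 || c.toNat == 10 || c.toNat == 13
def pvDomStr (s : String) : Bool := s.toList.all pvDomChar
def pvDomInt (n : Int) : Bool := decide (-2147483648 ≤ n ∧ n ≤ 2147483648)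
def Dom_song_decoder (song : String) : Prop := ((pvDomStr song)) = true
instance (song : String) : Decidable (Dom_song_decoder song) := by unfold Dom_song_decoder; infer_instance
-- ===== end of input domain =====

-- B replaces A's index-mutating in-place character-collapse loop by a split/filter-empties/rejoin pipeline (simpler decomposition; measured faster by a constant factor).


-- ===== PORT A =====
-- the while loop: cells of `lsong` are modeled as `List Char` (a 1-char string `[c]`, the cleared '' is `[]`)
def pvALoop (l : List (List Char)) (i : Nat) : List (List Char) :=
  if i < l.length - 2 then
    if (l.getD i [] = [' '] ∨ l.getD i [] = []) ∧ l.getD (i+1) [] = [' ']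
    then pvALoop (l.set (i+1) []) (i+1) else pvALoop l (i+1)
  else l
termination_by l.length - i
decreasing_by
  · simp only [List.length_set]; omega
  · omega

def song_decoder (song : String) : String :=
  let song1 := PySem.Str.replace song "WUB" " "
  let song2 := PySem.Str.strip song1
  let lsong : List (List Char) := song2.toList.map (fun c => [c])   -- list(song)
  if PySem.Str.len song2 ≤ 2 then song2
  else String.ofList ((pvALoop lsong 0).flatten)                    -- "".join(lsong)

-- ===== PORT B =====
def song_decoder_alt (song : String) : String :=
  let s := PySem.Str.strip (PySem.Str.replace song "WUB" " ")
  -- s.split(' ') with the non-empty literal separator ' ' is PySem.Chars.splitOn; ' '.join = Chars.join [' ']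
  String.ofList (PySem.Chars.join [' ']
    ((PySem.Chars.splitOn s.toList [' ']).filter (fun w => w ≠ [])))

-- ===== PRECONDITION & SPEC =====
def Spec_song_decoder (song : String) (out : String) : Prop := out = song_decoder_alt song
instance (song : String) (out : String) : Decidable (Spec_song_decoder song out) := by unfold Spec_song_decoder; infer_instance

-- ===== CLAIM (what is proved, stated in full; the proofs are below) =====
def Claim_equal_song_decoder : Prop := ∀ (song : String), Dom_song_decoder song → Spec_song_decoder song (song_decoder song)

-- ===== LEMMAS AND PROOFS =====

-- canonical spec: collapse every run of spaces to a single space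
def pvSq : List Char → List Char
  | [] => []
  | c :: t => if c = ' ' then ' ' :: pvSq (t.dropWhile (· = ' ')) else c :: pvSq t
termination_by l => l.length
decreasing_by
  · exact Nat.lt_succ_of_le (List.length_dropWhile_le _ _)
  · simp

-- ---- A side ----

-- structural view of A's while loop from position `pre.length` on
def pvRun (c : List Char) : List (List Char) → List (List Char)
  | [] => [c]
  | [d] => [c, d]
  | d :: e :: t =>
      c :: pvRun (if (c = [' '] ∨ c = []) ∧ d = [' '] then [] else d) (e :: t)

lemma pvALoop_run : ∀ (t : List (List Char)) (pre : List (List Char)) (c : List Char),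
    pvALoop (pre ++ c :: t) pre.length = pre ++ pvRun c t := by
  intro t
  induction t with
  | nil =>
    intro pre c
    rw [pvALoop]
    simp [pvRun]
  | cons d t' ih =>
    intro pre c
    cases t' with
    | nil =>
      rw [pvALoop]
      simp [pvRun]
    | cons e t'' =>
      rw [pvALoop]
      have hlen : pre.length < (pre ++ c :: d :: e :: t'').length - 2 := by
        simp; omega
      have hc : (pre ++ c :: d :: e :: t'').getD pre.length [] = c := by
        simp [List.getD]
      have hd : (pre ++ c :: d :: e :: t'').getD (pre.length + 1) [] = d := by
        simp [List.getD]
      have hset : (pre ++ c :: d :: e :: t'').set (pre.length + 1) [] =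
          (pre ++ [c]) ++ ([] : List Char) :: e :: t'' := by
        rw [List.set_append]
        simp
      rw [if_pos hlen, hc, hd]
      by_cases hcond : (c = [' '] ∨ c = []) ∧ d = [' ']
      · rw [if_pos hcond, hset]
        have h2 := ih (pre ++ [c]) []
        simp only [List.length_append, List.length_cons, List.length_nil] at h2 ⊢
        rw [h2]
        simp [pvRun, hcond]
      · rw [if_neg hcond]
        have h3 : pre ++ c :: d :: e :: t'' = (pre ++ [c]) ++ d :: e :: t'' := by simp
        rw [h3]
        have h2 := ih (pre ++ [c]) d
        simp only [List.length_append, List.length_cons, List.length_nil] at h2 ⊢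
        rw [h2]
        simp [pvRun, hcond]

-- what the loop's clearing does on the underlying characters (last cell never cleared)
def pvDfst (prev : Char) : List Char → List Char
  | [] => []
  | [c] => [c]
  | c :: d :: t => (if prev = ' ' ∧ c = ' ' then [] else [c]) ++ pvDfst c (d :: t)

lemma pvRun_flatten : ∀ (t : List Char) (prev : Char) (cell : List Char),
    (cell = [prev] ∨ (cell = [] ∧ prev = ' ')) →
    (pvRun cell (t.map (fun c => [c]))).flatten = cell ++ pvDfst prev t := by
  intro t
  induction t with
  | nil => intro prev cell _; simp [pvRun, pvDfst]
  | cons d t' ih =>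
    intro prev cell hinv
    cases t' with
    | nil => simp [pvRun, pvDfst]
    | cons e t'' =>
      have hcellsp : (cell = [' '] ∨ cell = []) ↔ prev = ' ' := by
        rcases hinv with h | ⟨h1, h2⟩ <;> subst_vars <;> simp
      simp only [List.map_cons, pvRun]
      by_cases hp : prev = ' ' ∧ d = ' '
      · have hcond : (cell = [' '] ∨ cell = []) ∧ [d] = [' '] := by
          refine ⟨hcellsp.mpr hp.1, by simp [hp.2]⟩
        rw [if_pos hcond]
        have := ih d [] (Or.inr ⟨rfl, hp.2⟩)
        simp only [List.map_cons] at this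
        simp [List.flatten_cons, this, pvDfst, hp]
      · have hcond : ¬ ((cell = [' '] ∨ cell = []) ∧ [d] = [' ']) := by
          intro ⟨ha, hb⟩
          exact hp ⟨hcellsp.mp ha, by simpa using hb⟩
        rw [if_neg hcond]
        have := ih d [d] (Or.inl rfl)
        simp only [List.map_cons] at this
        simp [List.flatten_cons, this, pvDfst, hp]

-- clearing second-of-a-pair spaces equals collapsing runs, for inputs not ending in a space
lemma pvDfst_sq : ∀ (t : List Char),
    (∀ c : Char, (c :: t).getLast? ≠ some ' ' → c :: pvDfst c t = pvSq (c :: t)) ∧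
    (t.getLast? ≠ some ' ' → pvDfst ' ' t = pvSq (t.dropWhile (· = ' '))) := by
  intro t
  induction t with
  | nil =>
    constructor
    · intro c _
      by_cases hc : c = ' ' <;> simp [pvDfst, pvSq, hc]
    · intro _; simp [pvDfst, pvSq]
  | cons d t' ih =>
    obtain ⟨ih1, ih2⟩ := ih
    have part2 : (d :: t').getLast? ≠ some ' ' →
        pvDfst ' ' (d :: t') = pvSq ((d :: t').dropWhile (· = ' ')) := by
      intro hlast
      cases t' with
      | nil =>
        have hd : d ≠ ' ' := by simpa using hlast
        simp [pvDfst, pvSq, hd]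
      | cons e t'' =>
        have hlast' : (e :: t'').getLast? ≠ some ' ' := by
          rwa [List.getLast?_cons_cons] at hlast
        by_cases hd : d = ' '
        · subst hd
          have hstep : pvDfst ' ' (' ' :: e :: t'') = pvDfst ' ' (e :: t'') := by
            simp [pvDfst]
          rw [hstep, ih2 hlast']
          simp [List.dropWhile]
        · have hstep : pvDfst ' ' (d :: e :: t'') = d :: pvDfst d (e :: t'') := by
            simp [pvDfst, hd]
          rw [hstep,
            show List.dropWhile (fun x => decide (x = ' ')) (d :: e :: t'') = d :: e :: t'' from by
              simp [List.dropWhile, hd]]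
          exact ih1 d hlast'
    constructor
    · intro c hlast
      have hlast' : (d :: t').getLast? ≠ some ' ' := by
        rwa [List.getLast?_cons_cons] at hlast
      by_cases hc : c = ' '
      · subst hc
        have : pvSq (' ' :: d :: t') = ' ' :: pvSq ((d :: t').dropWhile (· = ' ')) := by
          simp [pvSq]
        rw [this, ← part2 hlast']
      · have hsq : pvSq (c :: d :: t') = c :: pvSq (d :: t') := by simp [pvSq, hc]
        rw [hsq, ← ih1 d hlast']
        cases t' with
        | nil => simp [pvDfst]
        | cons e t'' => simp [pvDfst, hc]
    · exact part2

-- ---- B side ----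

-- fuel-free transcription of PySem.Chars.splitOn.go for the separator [' ']
def pvMySplit : List Char → List Char → List (List Char) → List (List Char)
  | [], cur, acc => (cur.reverse :: acc).reverse
  | c :: rest, cur, acc =>
      if c = ' ' then pvMySplit rest [] (cur.reverse :: acc) else pvMySplit rest (c :: cur) acc

lemma pvGo_eq : ∀ (l : List Char) (f : Nat) (cur : List Char) (acc : List (List Char)),
    l.length < f → PySem.Chars.splitOn.go [' '] f l cur acc = pvMySplit l cur acc := by
  intro l
  induction l with
  | nil =>
    intro f cur acc hf
    cases f with
    | zero => omega
    | succ f' => rw [PySem.Chars.splitOn.go] <;> simp [pvMySplit]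
  | cons c rest ih =>
    intro f cur acc hf
    cases f with
    | zero => omega
    | succ f' =>
      rw [PySem.Chars.splitOn.go]
      by_cases hc : c = ' '
      · subst hc
        simp only [pvMySplit]
        have hpre : [' '].isPrefixOf (' ' :: rest) = true := by simp [List.isPrefixOf]
        simp only [hpre, reduceIte]
        simp only [List.length_singleton, List.drop_succ_cons, List.drop_zero]
        exact ih f' [] (cur.reverse :: acc) (by simp at hf ⊢; omega)
      · have hpre : [' '].isPrefixOf (c :: rest) = false := by
          simp [List.isPrefixOf, Ne.symm hc]
        simp only [hpre, Bool.false_eq_true, if_false]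
        simp only [pvMySplit, if_neg hc]
        exact ih f' (c :: cur) acc (by simp at hf ⊢; omega)

lemma pvMySplit_acc : ∀ (l cur : List Char) (acc : List (List Char)),
    pvMySplit l cur acc = acc.reverse ++ pvMySplit l cur [] := by
  intro l
  induction l with
  | nil => intro cur acc; simp [pvMySplit]
  | cons c rest ih =>
    intro cur acc
    by_cases hc : c = ' '
    · simp only [pvMySplit, if_pos hc]
      rw [ih [] (cur.reverse :: acc), ih [] [cur.reverse]]
      simp
    · simp only [pvMySplit, if_neg hc]
      exact ih (c :: cur) acc

-- tokens of l split on ' ' (with empties), structurally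
def pvT : List Char → List (List Char)
  | [] => [[]]
  | c :: r => if c = ' ' then [] :: pvT r else (pvT r).modifyHead (c :: ·)

lemma pvMySplit_T : ∀ (l cur : List Char),
    pvMySplit l cur [] = (pvT l).modifyHead (cur.reverse ++ ·) := by
  intro l
  induction l with
  | nil => intro cur; simp [pvMySplit, pvT]
  | cons c rest ih =>
    intro cur
    by_cases hc : c = ' '
    · simp only [pvMySplit, pvT, hc, reduceIte]
      rw [pvMySplit_acc, ih []]
      cases pvT rest <;> simp
    · simp only [pvMySplit, pvT, if_neg hc]
      rw [ih (c :: cur)]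
      cases pvT rest <;> simp

lemma pvSplitOn_T (l : List Char) : PySem.Chars.splitOn l [' '] = pvT l := by
  have h1 : PySem.Chars.splitOn l [' '] = PySem.Chars.splitOn.go [' '] (l.length + 1) l [] [] := rfl
  rw [h1, pvGo_eq l (l.length + 1) [] [] (by omega), pvMySplit_T]
  cases pvT l <;> simp

-- join of the nonempty tokens
def pvJF (l : List Char) : List Char :=
  PySem.Chars.join [' '] ((pvT l).filter (fun w => w ≠ []))

def pvK (l : List Char) : List Char :=
  match pvT l with
  | [] => []
  | w :: rest =>
      w ++ (if rest.filter (fun w => w ≠ []) = [] then []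
            else ' ' :: PySem.Chars.join [' '] (rest.filter (fun w => w ≠ [])))

lemma pvK_eq {l w : List Char} {rest : List (List Char)} (h : pvT l = w :: rest) :
    pvK l = w ++ (if rest.filter (fun w => w ≠ []) = [] then []
      else ' ' :: PySem.Chars.join [' '] (rest.filter (fun w => w ≠ []))) := by
  unfold pvK
  rw [h]

lemma pvJoin_cons (a : List Char) (rest : List (List Char)) :
    PySem.Chars.join [' '] (a :: rest) =
      a ++ (if rest = [] then [] else ' ' :: PySem.Chars.join [' '] rest) := by
  cases rest with
  | nil => simp [PySem.Chars.join, List.intercalate]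
  | cons b t =>
    simp [PySem.Chars.join_cons_cons]

lemma pvT_cons_space (r : List Char) : pvT (' ' :: r) = [] :: pvT r := by
  simp [pvT]

lemma pvT_cons_nonspace {c : Char} (hc : c ≠ ' ') (r : List Char) :
    pvT (c :: r) = (pvT r).modifyHead (c :: ·) := by
  simp [pvT, hc]

lemma pvT_ne_nil (l : List Char) : pvT l ≠ [] := by
  induction l with
  | nil => simp [pvT]
  | cons c r ih =>
    by_cases hc : c = ' '
    · simp [pvT, hc]
    · rw [pvT_cons_nonspace hc]
      cases h : pvT r with
      | nil => exact absurd h ih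
      | cons w rest => simp

lemma pvT_filter_ne_nil : ∀ (l : List Char), l ≠ [] → l.getLast? ≠ some ' ' →
    (pvT l).filter (fun w => w ≠ []) ≠ [] := by
  intro l
  induction l with
  | nil => intro h; exact absurd rfl h
  | cons c r ih =>
    intro _ hlast
    cases r with
    | nil =>
      have hc : c ≠ ' ' := by simpa using hlast
      simp [pvT, hc]
    | cons e t =>
      have hlast' : (e :: t).getLast? ≠ some ' ' := by
        rwa [List.getLast?_cons_cons] at hlast
      have hr := ih (by simp) hlast'
      by_cases hc : c = ' '
      · simpa [pvT, hc] using hr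
      · rw [pvT_cons_nonspace hc]
        cases h : pvT (e :: t) with
        | nil => exact absurd h (pvT_ne_nil _)
        | cons w rest => simp

lemma pvBK : ∀ (l : List Char), l.getLast? ≠ some ' ' →
    pvJF l = pvSq (l.dropWhile (· = ' ')) ∧ pvK l = pvSq l := by
  intro l
  induction l with
  | nil => intro _; simp [pvJF, pvK, pvT, pvSq, PySem.Chars.join, List.intercalate]
  | cons c r ih =>
    intro hlast
    -- step facts about pvT / pvJF / pvK on c :: r
    by_cases hc : c = ' '
    · -- leading space: token list gains an empty token
      subst hc
      have hr : r ≠ [] := by rintro rfl; simp at hlast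
      have hlast' : r.getLast? ≠ some ' ' := by
        cases r with
        | nil => simp
        | cons e t => rwa [List.getLast?_cons_cons] at hlast
      obtain ⟨ihJ, _⟩ := ih hlast'
      have hTf : (pvT r).filter (fun w => w ≠ []) ≠ [] := pvT_filter_ne_nil r hr hlast'
      constructor
      · show PySem.Chars.join [' '] ((pvT (' ' :: r)).filter _) = _
        rw [pvT_cons_space r]
        simp only [List.filter_cons, ne_eq, not_true_eq_false, decide_false]
        rw [show (' ' :: r).dropWhile (· = ' ') = r.dropWhile (· = ' ') by simp [List.dropWhile]]
        exact ihJ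
      · rw [pvK_eq (pvT_cons_space r), if_neg hTf]
        have hsq' : pvSq (' ' :: r) = ' ' :: pvSq (r.dropWhile (· = ' ')) := by simp [pvSq]
        rw [hsq', ← ihJ]
        rfl
    · -- non-space head: it is prepended to the first token
      have hlast' : r.getLast? ≠ some ' ' ∨ r = [] := by
        cases r with
        | nil => exact Or.inr rfl
        | cons e t => exact Or.inl (by rwa [List.getLast?_cons_cons] at hlast)
      obtain ⟨w, rest, h⟩ : ∃ w rest, pvT r = w :: rest := by
        cases h : pvT r with
        | nil => exact absurd h (pvT_ne_nil _)
        | cons w rest => exact ⟨w, rest, rfl⟩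
      have h2 : pvT (c :: r) = (c :: w) :: rest := by
        rw [pvT_cons_nonspace hc, h]
        rfl
      have hK : pvK (c :: r) = c :: pvK r := by
        rw [pvK_eq h2, pvK_eq h]
        rfl
      have hJ : pvJF (c :: r) = c :: pvK r := by
        unfold pvJF
        rw [h2]
        simp only [List.filter_cons, ne_eq, reduceCtorEq, not_false_eq_true, decide_true]
        rw [if_pos trivial, pvJoin_cons, pvK_eq h]
        rfl
      have hKr : pvK r = pvSq r := by
        rcases hlast' with h | h
        · exact (ih h).2
        · subst h; simp [pvK, pvT, pvSq]
      have hsq : pvSq (c :: r) = c :: pvSq r := by simp [pvSq, hc]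
      refine ⟨?_, ?_⟩
      · rw [show (c :: r).dropWhile (· = ' ') = c :: r by simp [List.dropWhile, hc], hsq, hJ, hKr]
      · rw [hK, hKr, hsq]

-- ---- strip facts ----

lemma pvHead_dropWhile {p : Char → Bool} {l : List Char} {c : Char}
    (h : (l.dropWhile p).head? = some c) : p c = false := by
  cases hd : l.dropWhile p with
  | nil => simp [hd] at h
  | cons a t =>
    have hne : l.dropWhile p ≠ [] := by simp [hd]
    have := List.head_dropWhile_not p hne
    simp only [hd, List.head_cons] at this
    simp [hd] at h
    rwa [← h]

lemma pvStrip_getLast (x : List Char) : (PySem.Chars.strip x).getLast? ≠ some ' ' := by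
  intro h
  unfold PySem.Chars.strip PySem.Chars.rstrip at h
  rw [List.getLast?_reverse] at h
  have := pvHead_dropWhile h
  simp [PySem.Chars.isspace] at this

lemma pvStrip_head (x : List Char) : (PySem.Chars.strip x).head? ≠ some ' ' := by
  intro h
  unfold PySem.Chars.strip PySem.Chars.rstrip at h
  set w := PySem.Chars.lstrip x with hw
  have hsuf : (List.dropWhile PySem.Chars.isspace w.reverse) <:+ w.reverse :=
    List.dropWhile_suffix _
  have hpre : (List.dropWhile PySem.Chars.isspace w.reverse).reverse <+: w := by
    have h2 := List.reverse_prefix.mpr hsuf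
    simpa using h2
  obtain ⟨rest, hrest⟩ := hpre
  have hhead : w.head? = some ' ' := by
    rw [← hrest, List.head?_append, h]
    rfl
  unfold PySem.Chars.lstrip at hw
  rw [hw] at hhead
  have := pvHead_dropWhile hhead
  simp [PySem.Chars.isspace] at this

-- ---- assembly ----

lemma pvSq_short (l : List Char) (hlen : l.length ≤ 2) (hhead : l.head? ≠ some ' ') :
    pvSq l = l := by
  match l with
  | [] => simp [pvSq]
  | [a] =>
    have ha : a ≠ ' ' := by simpa using hhead
    simp [pvSq, ha]
  | [a, b] =>
    have ha : a ≠ ' ' := by simpa using hhead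
    by_cases hb : b = ' ' <;> simp [pvSq, ha, hb, List.dropWhile]
  | a :: b :: c :: t => simp at hlen

lemma pvDropWhile_head {l : List Char} (hhead : l.head? ≠ some ' ') :
    l.dropWhile (· = ' ') = l := by
  cases l with
  | nil => rfl
  | cons a t =>
    have : a ≠ ' ' := by simpa using hhead
    simp [List.dropWhile, this]

-- B's value is the space-collapse of the stripped character list
lemma pvB_eq_sq (x : List Char) :
    PySem.Chars.join [' ']
      ((PySem.Chars.splitOn (PySem.Chars.strip x) [' ']).filter (fun w => w ≠ [])) =
    pvSq (PySem.Chars.strip x) := by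
  rw [pvSplitOn_T]
  have h := (pvBK (PySem.Chars.strip x) (pvStrip_getLast x)).1
  rw [pvDropWhile_head (pvStrip_head x)] at h
  exact h

-- ===== VERDICT (by name: the statement is the Claim_ definition above) =====
theorem song_decoder_spec : Claim_equal_song_decoder := by
  intro song _
  unfold Spec_song_decoder song_decoder song_decoder_alt
  simp only [PySem.Str.len_eq, PySem.Str.toList_strip, PySem.Str.toList_replace]
  set cs := PySem.Chars.strip (PySem.Chars.replace song.toList "WUB".toList " ".toList) with hcs
  have hB := pvB_eq_sq (PySem.Chars.replace song.toList "WUB".toList " ".toList)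
  rw [← hcs] at hB
  have hstrip : PySem.Str.strip (PySem.Str.replace song "WUB" " ") = String.ofList cs := by
    simp [PySem.Str.strip, PySem.Str.toList_replace, hcs]
  rw [hstrip, hB]
  by_cases hlen : (cs.length : Int) ≤ 2
  · rw [if_pos hlen]
    rw [pvSq_short cs (by exact_mod_cast hlen) (by rw [hcs]; exact pvStrip_head _)]
  · rw [if_neg hlen]
    have hlen' : 2 < cs.length := by exact_mod_cast not_le.mp hlen
    cases hcase : cs with
    | nil => rw [hcase] at hlen'; simp at hlen'
    | cons c0 t =>
      have hloop := pvALoop_run (t.map (fun c => [c])) [] [c0]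
      simp only [List.nil_append, List.length_nil] at hloop
      rw [List.map_cons, hloop]
      have hc0 : c0 ≠ ' ' := by
        have := pvStrip_head (PySem.Chars.replace song.toList "WUB".toList " ".toList)
        rw [← hcs, hcase] at this
        simpa using this
      have hlast : (c0 :: t).getLast? ≠ some ' ' := by
        rw [← hcase, hcs]; exact pvStrip_getLast _
      rw [pvRun_flatten t c0 [c0] (Or.inl rfl)]
      have := (pvDfst_sq t).1 c0 hlast
      simp only [List.singleton_append]
      rw [this]
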